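-- pv_equiv track=rewrite | github.com/Anagabsoares/core-problem-set-recursion | part-2.py | digit_match
-- ===== SOURCE A (Python) =====
-- def digit_match(int1, int2):
--
--     if int1 <10 or int2 <10:
--         if int1 % 10 == int2 %10 :
--             return 1
--         else:
--             return 0
--     if int1 % 10 == int2%10:
--         return 1 + digit_match(int1//10, int2//10)
--
--     return digit_match(int1//10, int2//10)
-- ===== SOURCE B (Python) =====
-- def digit_match(int1, int2):
--     count = 0
--     while not (int1 < 10 or int2 < 10):
--         if int1 % 10 == int2 % 10:
--             count += 1
--         int1 //= 10
--         int2 //= 10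
--     if int1 % 10 == int2 % 10:
--         count += 1
--     return count
-- ===== Notes on version B (the rewrite author's own statement) =====
-- stated objective: alternative
-- what changed: Replaced the recursive descent with an iterative while-loop carrying an explicit count accumulator and one final trailing-digit comparison after the loop.
import Mathlib
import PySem

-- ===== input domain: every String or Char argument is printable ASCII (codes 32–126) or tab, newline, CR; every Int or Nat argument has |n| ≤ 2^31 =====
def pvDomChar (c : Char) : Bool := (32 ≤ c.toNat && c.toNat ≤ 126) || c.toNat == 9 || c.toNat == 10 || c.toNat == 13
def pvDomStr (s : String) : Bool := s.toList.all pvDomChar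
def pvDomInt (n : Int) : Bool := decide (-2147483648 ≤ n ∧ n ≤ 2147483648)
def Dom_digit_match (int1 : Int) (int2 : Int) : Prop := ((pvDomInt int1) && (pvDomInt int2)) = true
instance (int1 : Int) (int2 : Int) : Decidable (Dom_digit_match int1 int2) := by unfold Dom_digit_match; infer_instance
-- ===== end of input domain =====

-- B replaces A's recursion by an iterative accumulator loop with one final comparison (alternative decomposition, same cost).


theorem pv_floordiv10_toNat_lt (a : Int) (h : 10 ≤ a) :
    (PySem.Int.floordiv a 10).toNat < a.toNat := by
  rw [PySem.Int.floordiv_eq_ediv_of_pos (by omega)]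
  omega

-- ===== PORT A =====
def digit_match (int1 : Int) (int2 : Int) : Int :=
  if int1 < 10 ∨ int2 < 10 then
    if PySem.Int.mod int1 10 = PySem.Int.mod int2 10 then 1 else 0
  else if PySem.Int.mod int1 10 = PySem.Int.mod int2 10 then
    1 + digit_match (PySem.Int.floordiv int1 10) (PySem.Int.floordiv int2 10)
  else
    digit_match (PySem.Int.floordiv int1 10) (PySem.Int.floordiv int2 10)
termination_by int1.toNat
decreasing_by
  all_goals exact pv_floordiv10_toNat_lt int1 (by omega)

-- ===== PORT B =====
-- while not (int1 < 10 or int2 < 10): returns the loop's final state (int1, int2, count)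
def digit_match_alt_loop (int1 : Int) (int2 : Int) (count : Int) : Int × Int × Int :=
  if ¬ (int1 < 10 ∨ int2 < 10) then
    digit_match_alt_loop (PySem.Int.floordiv int1 10) (PySem.Int.floordiv int2 10)
      (if PySem.Int.mod int1 10 = PySem.Int.mod int2 10 then count + 1 else count)
  else
    (int1, int2, count)
termination_by int1.toNat
decreasing_by
  exact pv_floordiv10_toNat_lt int1 (by omega)

def digit_match_alt (int1 : Int) (int2 : Int) : Int :=
  let s := digit_match_alt_loop int1 int2 0
  if PySem.Int.mod s.1 10 = PySem.Int.mod s.2.1 10 then s.2.2 + 1 else s.2.2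

-- ===== PRECONDITION & SPEC =====
def Spec_digit_match (int1 : Int) (int2 : Int) (out : Int) : Prop := out = digit_match_alt int1 int2
instance (int1 : Int) (int2 : Int) (out : Int) : Decidable (Spec_digit_match int1 int2 out) := by unfold Spec_digit_match; infer_instance

-- ===== CLAIM (what is proved, stated in full; the proofs are below) =====
def Claim_equal_digit_match : Prop := ∀ (int1 : Int) (int2 : Int), Dom_digit_match int1 int2 → Spec_digit_match int1 int2 (digit_match int1 int2)

-- ===== LEMMAS AND PROOFS =====

-- the one comparison B performs after its loop, as a function of the loop's final state
def pvFinal (s : Int × Int × Int) : Int :=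
  if PySem.Int.mod s.1 10 = PySem.Int.mod s.2.1 10 then s.2.2 + 1 else s.2.2

theorem pv_base (a b c : Int) (h : a < 10 ∨ b < 10) :
    pvFinal (digit_match_alt_loop a b c) = c + digit_match a b := by
  rw [digit_match_alt_loop, if_neg (not_not_intro h), digit_match, if_pos h]
  show (if PySem.Int.mod a 10 = PySem.Int.mod b 10 then c + 1 else c)
      = c + (if PySem.Int.mod a 10 = PySem.Int.mod b 10 then 1 else 0)
  split_ifs <;> omega

theorem pv_loop_final (n : Nat) : ∀ (a b c : Int), a.toNat ≤ n →
    pvFinal (digit_match_alt_loop a b c) = c + digit_match a b := by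
  induction n with
  | zero =>
    intro a b c ha
    exact pv_base a b c (Or.inl (by omega))
  | succ n ih =>
    intro a b c ha
    by_cases h : a < 10 ∨ b < 10
    · exact pv_base a b c h
    · rw [digit_match_alt_loop, if_pos h]
      rw [ih _ _ _ (by have := pv_floordiv10_toNat_lt a (by omega); omega)]
      conv_rhs => rw [digit_match, if_neg h]
      by_cases hm : PySem.Int.mod a 10 = PySem.Int.mod b 10
      · rw [if_pos hm, if_pos hm]; omega
      · rw [if_neg hm, if_neg hm]

-- ===== VERDICT (by name: the statement is the Claim_ definition above) =====
theorem digit_match_spec : Claim_equal_digit_match := by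
  intro a b _
  show digit_match a b = digit_match_alt a b
  have h := pv_loop_final a.toNat a b 0 (le_refl _)
  show digit_match a b = pvFinal (digit_match_alt_loop a b 0)
  omega
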